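-- pv_equiv track=rewrite | github.com/matyaki-matyaki/KernelForML100 | src/exercise/Chap1/problem12.py | string_kernel
-- ===== SOURCE A (Python) =====
-- def string_kernel(x: str, y: str) -> float:
--     """String kernel."""
--     m, n = len(x), len(y)
--     S = 0
--     for i in range(m):
--         for j in range(i, m):
--             for k in range(n):
--                 if x[i:j+1] == y[k:k + j - i + 1]:
--                     S += 1
--     return S
-- ===== SOURCE B (Python) =====
-- def string_kernel(x: str, y: str) -> float:
--     """String kernel: sum over all (i, k) of the longest common extension of
--     x starting at i and y starting at k (each unit of the extension is one
--     (substring, occurrence) pair counted by the naive triple loop)."""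
--     def lcp(a: str, b: str) -> int:
--         l = 0
--         while l < len(a) and l < len(b) and a[l] == b[l]:
--             l += 1
--         return l
--     return sum(lcp(x[i:], y[k:]) for i in range(len(x)) for k in range(len(y)))
-- ===== Notes on version B (the rewrite author's own statement) =====
-- stated objective: faster
-- what changed: Replaces the triple loop over (start, end, position) with string-slice comparisons by a double loop over (start in x, start in y) that adds the longest-common-extension length, since the number of end positions j matching at a fixed (i,k) equals lcp(x[i:], y[k:]).
import Mathlib
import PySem

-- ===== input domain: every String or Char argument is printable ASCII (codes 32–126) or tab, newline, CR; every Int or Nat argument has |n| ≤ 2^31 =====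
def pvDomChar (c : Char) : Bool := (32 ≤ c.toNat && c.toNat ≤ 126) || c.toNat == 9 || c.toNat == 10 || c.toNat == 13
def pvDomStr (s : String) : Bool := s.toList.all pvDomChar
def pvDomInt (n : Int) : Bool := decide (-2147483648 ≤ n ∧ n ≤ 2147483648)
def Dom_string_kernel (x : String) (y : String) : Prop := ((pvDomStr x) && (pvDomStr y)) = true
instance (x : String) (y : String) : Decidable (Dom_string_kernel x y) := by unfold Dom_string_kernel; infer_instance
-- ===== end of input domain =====

-- B replaces A's triple loop over (start,end,occurrence) by a double loop adding
-- longest-common-extension lengths; objective: faster (asymptotic).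

-- ===== PORT A =====
def string_kernel (x : String) (y : String) : Int :=
  let xs := x.toList
  let ys := y.toList
  let m : Int := xs.length
  let n : Int := ys.length
  (PySem.List.pyRange 0 m 1).foldl (fun S i =>
    (PySem.List.pyRange i m 1).foldl (fun S j =>
      (PySem.List.pyRange 0 n 1).foldl (fun S k =>
        if PySem.List.slice xs (some i) (some (j + 1)) =
           PySem.List.slice ys (some k) (some (k + j - i + 1)) then S + 1 else S) S) S) 0

-- ===== PORT B =====
-- longest common prefix length of two lists (Source B's lcp while-loop)
def pvLcp : List Char → List Char → Nat
  | a :: as, b :: bs => if a = b then pvLcp as bs + 1 else 0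
  | _, _ => 0

def string_kernel_alt (x : String) (y : String) : Int :=
  let xs := x.toList
  let ys := y.toList
  ((List.range xs.length).map (fun i =>
    ((List.range ys.length).map (fun k =>
      (pvLcp (xs.drop i) (ys.drop k) : Int))).sum)).sum

-- ===== PRECONDITION & SPEC =====
def Spec_string_kernel (x : String) (y : String) (out : Int) : Prop := out = string_kernel_alt x y
instance (x : String) (y : String) (out : Int) : Decidable (Spec_string_kernel x y out) := by unfold Spec_string_kernel; infer_instance

-- ===== CLAIM (what is proved, stated in full; the proofs are below) =====
def Claim_equal_string_kernel : Prop := ∀ (x : String) (y : String), Dom_string_kernel x y → Spec_string_kernel x y (string_kernel x y)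

-- ===== LEMMAS AND PROOFS =====

theorem pvLcp_le_left : ∀ (a b : List Char), pvLcp a b ≤ a.length := by
  intro a
  induction a with
  | nil => intro b; cases b <;> simp [pvLcp]
  | cons c as ih =>
    intro b
    cases b with
    | nil => simp [pvLcp]
    | cons d bs =>
      simp only [pvLcp]
      split_ifs <;> simp [List.length_cons]
      exact ih bs

-- take L a = take L b iff L ≤ lcp, provided L ≤ |a|
theorem take_eq_iff_le_lcp : ∀ (L : ℕ) (a b : List Char), L ≤ a.length →
    (a.take L = b.take L ↔ L ≤ pvLcp a b) := by
  intro L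
  induction L with
  | zero => intro a b _; simp
  | succ L ih =>
    intro a b hL
    cases a with
    | nil => simp at hL
    | cons c as =>
      cases b with
      | nil =>
        simp [pvLcp]
      | cons d bs =>
        simp only [List.take_succ_cons, List.cons.injEq, pvLcp]
        split_ifs with h
        · subst h
          simp only [ih as bs (by simpa using hL), true_and]
          omega
        · simp [h]

theorem countP_lt_range (M c : ℕ) :
    ((List.range M).countP fun t => decide (t < c)) = min c M := by
  induction M with
  | zero => simp
  | succ M ih =>
    rw [List.range_succ, List.countP_append, ih]
    simp only [List.countP_cons, List.countP_nil]
    by_cases h : M < c <;> simp [h] <;> omega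

-- the heart: for fixed starts, the number of end lengths matching is the lcp
theorem countP_take_eq_lcp (a b : List Char) :
    ((List.range a.length).countP fun t => decide (a.take (t + 1) = b.take (t + 1))) =
      pvLcp a b := by
  have h1 : ((List.range a.length).countP fun t => decide (a.take (t + 1) = b.take (t + 1)))
      = ((List.range a.length).countP fun t => decide (t < pvLcp a b)) := by
    apply List.countP_congr
    intro t ht
    simp only [List.mem_range] at ht
    simp only [decide_eq_true_eq]
    rw [take_eq_iff_le_lcp (t + 1) a b (by omega)]
    omega
  rw [h1, countP_lt_range]
  exact Nat.min_eq_left (pvLcp_le_left a b)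

-- sum interchange for list-of-list sums over Int
theorem sum_swap_list {α β : Type} (J : List α) (K : List β) (f : α → β → Int) :
    (J.map (fun j => (K.map (f j)).sum)).sum =
      (K.map (fun k => (J.map (fun j => f j k)).sum)).sum := by
  induction J with
  | nil => simp
  | cons j J ih =>
    simp only [List.map_cons, List.sum_cons, ih]
    rw [← List.sum_map_add]

theorem sum_ite_prop {α : Type} (l : List α) (p : α → Prop) [DecidablePred p] :
    (l.map (fun x => if p x then (1:Int) else 0)).sum = (l.countP (fun x => decide (p x)) : Int) := by
  induction l with
  | nil => simp
  | cons a l ih =>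
    simp only [List.map_cons, List.sum_cons, ih, List.countP_cons]
    split_ifs with h h2 <;> simp_all
    omega

theorem kernel_lists (xs ys : List Char) :
    (PySem.List.pyRange 0 (xs.length : Int)).foldl (fun S i =>
      (PySem.List.pyRange i (xs.length : Int)).foldl (fun S j =>
        (PySem.List.pyRange 0 (ys.length : Int)).foldl (fun S k =>
          if PySem.List.slice xs (some i) (some (j + 1)) =
             PySem.List.slice ys (some k) (some (k + j - i + 1)) then S + 1 else S) S) S) 0
    = ((List.range xs.length).map (fun i =>
        ((List.range ys.length).map (fun k =>
          (pvLcp (xs.drop i) (ys.drop k) : Int))).sum)).sum := by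
  simp only [PySem.List.foldl_ite_add_one, PySem.List.foldl_add, zero_add,
    PySem.List.pyRange_zero_natCast, List.map_map]
  refine congrArg List.sum (List.map_congr_left ?_)
  intro i hi
  simp only [List.mem_range] at hi
  simp only [Function.comp_def]
  rw [PySem.List.pyRange_one ((i:Int)) (xs.length : Int), List.map_map]
  rw [show (((xs.length:Int) - (i:Int)).toNat) = xs.length - i from by omega]
  simp only [List.countP_map, Function.comp_def]
  simp only [← sum_ite_prop]
  rw [sum_swap_list]
  refine congrArg List.sum (List.map_congr_left ?_)
  intro k hk
  have e : ∀ t : ℕ, (if PySem.List.slice xs (some (i:Int)) (some (((i:Int) + (t:Int)) + 1)) =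
        PySem.List.slice ys (some ((k:ℕ):Int)) (some (((k:ℕ):Int) + ((i:Int) + (t:Int)) - (i:Int) + 1)) then (1:Int) else 0)
      = (if (xs.drop i).take (t+1) = (ys.drop k).take (t+1) then (1:Int) else 0) := by
    intro t
    rw [show ((i:Int) + (t:Int)) + 1 = ((i:ℕ):Int) + ((t+1 : ℕ):Int) from by push_cast; ring]
    rw [show ((k:ℕ):Int) + ((i:Int) + (t:Int)) - (i:Int) + 1 = ((k:ℕ):Int) + ((t+1 : ℕ):Int) from by push_cast; ring]
    rw [PySem.List.slice_natCast_add, PySem.List.slice_natCast_add]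
  simp only [e]
  rw [sum_ite_prop, show xs.length - i = (xs.drop i).length from by simp,
    countP_take_eq_lcp]

theorem string_kernel_eq (x y : String) : string_kernel x y = string_kernel_alt x y := by
  simp only [string_kernel, string_kernel_alt]
  exact kernel_lists x.toList y.toList

-- ===== VERDICT (by name: the statement is the Claim_ definition above) =====
theorem string_kernel_spec : Claim_equal_string_kernel := by
  intro x y _
  unfold Spec_string_kernel
  exact string_kernel_eq x y
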